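-- pv_equiv track=rewrite | github.com/ashenafee/Bridge | filter.py | filter_summary
-- ===== SOURCE A (Python) =====
-- def filter_summary(results: list, filter: str) -> list:
--     """
--
--     :param results:
--     :param filter:
--     :return:
--     """
--     # Loop through each line in the results and check the species lineage.
--     removed = 0
--     filter_upper = filter.upper()
--
--     # Get tuples of where each entry starts and ends
--     entries = []
--     start = False
--     lineage = None
--     i1 = -1
--     for i in range(len(results)):
--         if start:
--             if (not (results[i].startswith('\t') or
--             results[i][0] == '-' or
--             results[i].startswith('Lineage: '))) or (i == len(results) - 1):
--                 i2 = i
--                 entries.append((i1, i2, filter_upper in lineage))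
--                 start = False
--
--         if not (results[i].startswith('\t') or results[i][0] == '-' or results[i].startswith('Lineage: ')):
--             start = True
--             i1 = i
--
--         if results[i].startswith('Lineage: '):
--             lineage = results[i].split('Lineage: ')[1]
--             lineage = lineage.split(';')
--             lineage = [x.strip().upper() for x in lineage]
--
--     # Remove entries that are not in the filter lineage
--     res = []
--     for entry in entries:
--         if not entry[2]:
--             removed += 1
--         else:
--             res += results[entry[0]:entry[1]]
--
--     res.insert(0, f'Removed {removed} results not in lineage {filter}\n\n')
--
--     return res
-- ===== SOURCE B (Python) =====
-- def filter_summary(results: list, filter: str) -> list: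
--     """Keep only entries whose lineage contains the filter taxon.
--
--     An entry starts at a header line (one that does not begin with a tab,
--     '-', or 'Lineage: ') and runs until the next header; the final line of
--     a summary is a trailing terminator and belongs to no entry.
--     """
--     filter_upper = filter.upper()
--     lineage = None
--     groups = []
--     current = None
--     for line in results[:-1]:
--         if not (line.startswith('\t') or line[0] == '-' or line.startswith('Lineage: ')):
--             if current is not None:
--                 groups.append((current, filter_upper in lineage))
--             current = [line]
--         elif current is not None:
--             current.append(line)
--         if line.startswith('Lineage: '):
--             lineage = [x.strip().upper() for x in line.split('Lineage: ')[1].split(';')]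
--     if current is not None:
--         groups.append((current, filter_upper in lineage))
--     removed = sum(1 for _, keep in groups if not keep)
--     out = [f'Removed {removed} results not in lineage {filter}\n\n']
--     for lines, keep in groups:
--         if keep:
--             out.extend(lines)
--     return out
-- ===== Notes on version B (the rewrite author's own statement) =====
-- stated objective: simpler
-- what changed: B drops the trailing terminator line up front (results[:-1]) and builds (lines, keep) groups in one direct scan, closing each entry at the next header, instead of A's two-phase scheme of recording (start, end) index pairs and re-slicing the results list in a second pass; Pre_ excludes only inputs where A raises (an empty line -> IndexError at line[0]; a first entry closed before any 'Lineage: ' line -> TypeError on 'in None').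
import Mathlib
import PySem

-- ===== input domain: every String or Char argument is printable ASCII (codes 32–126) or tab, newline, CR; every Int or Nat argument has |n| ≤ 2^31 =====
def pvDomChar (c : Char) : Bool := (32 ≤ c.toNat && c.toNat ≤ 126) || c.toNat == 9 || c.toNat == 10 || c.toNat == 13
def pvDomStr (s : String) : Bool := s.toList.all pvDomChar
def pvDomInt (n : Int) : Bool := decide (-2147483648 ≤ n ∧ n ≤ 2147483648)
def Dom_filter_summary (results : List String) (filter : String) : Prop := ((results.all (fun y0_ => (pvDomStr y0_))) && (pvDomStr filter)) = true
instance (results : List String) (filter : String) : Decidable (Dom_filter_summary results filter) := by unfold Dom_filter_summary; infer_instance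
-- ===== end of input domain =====

-- B treats the final line as a trailing terminator (results[:-1]) and builds (lines, keep)
-- groups in one direct scan, instead of recording (start, end) index pairs and re-slicing
-- in a second pass; objective: simpler. Return value only; neither program mutates its input.

-- ===== PORT A =====
-- shared Python expression `line.startswith('\t') or line[0] == '-' or line.startswith('Lineage: ')`,
-- evaluated identically by both programs.  On an empty line Python raises IndexError at line[0]
-- (pyGet? is none there); those inputs are outside Pre_.
def pvIsCont (line : String) : Bool :=
  PySem.Str.startswith line "\t" || (PySem.Str.pyGet? line 0 == some '-') || PySem.Str.startswith line "Lineage: "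

-- `[x.strip().upper() for x in line.split('Lineage: ')[1].split(';')]`, evaluated identically by both
-- programs; index 1 exists whenever line starts with 'Lineage: ' (the only context of use), so getD 1 "" is exact.
def pvParseLineage (line : String) : List String :=
  (((PySem.Str.split? (((PySem.Str.split? line "Lineage: ").getD []).getD 1 "") ";").getD [])).map
    (fun x => PySem.Str.upper (PySem.Str.strip x))
  -- split? is none only for sep = ""; both separators are nonempty literals, so getD [] is exact

-- `filter_upper in lineage`, evaluated identically by both programs.  Python raises TypeError when
-- lineage is still None at this point; those inputs are outside Pre_.
def pvInLineage (fu : String) (lineage : Option (List String)) : Bool :=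
  (lineage.getD []).contains fu

-- loop body of A's first for-loop (state: entries, start, lineage, i1)
def pvLoopA (results : List String) (n : Int) (fu : String)
    (st : List (Int × Int × Bool) × Bool × Option (List String) × Int) (i : Int) :
    List (Int × Int × Bool) × Bool × Option (List String) × Int :=
  let entries := st.1; let start := st.2.1; let lineage := st.2.2.1; let i1 := st.2.2.2
  let line := PySem.List.pyGetD results i ""   -- i comes from range(len(results)): in range
  let st1 : List (Int × Int × Bool) × Bool :=
    if start && (!(pvIsCont line) || (i == n - 1)) then
      (entries ++ [(i1, i, pvInLineage fu lineage)], false)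
    else (entries, start)
  let st2 : Bool × Int := if !(pvIsCont line) then (true, i) else (st1.2, i1)
  let lineage := if PySem.Str.startswith line "Lineage: " then some (pvParseLineage line) else lineage
  (st1.1, st2.1, lineage, st2.2)

-- loop body of A's second for-loop (state: removed, res)
def pvLoopA2 (results : List String) (p : Int × List String) (e : Int × Int × Bool) :
    Int × List String :=
  if !e.2.2 then (p.1 + 1, p.2) else (p.1, p.2 ++ PySem.List.slice results (some e.1) (some e.2.1))

def filter_summary (results : List String) (filter : String) : List String :=
  let filter_upper := PySem.Str.upper filter
  let n : Int := results.length
  let s := (PySem.List.pyRange 0 n 1).foldl (pvLoopA results n filter_upper) ([], false, none, -1)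
  let p := s.1.foldl (pvLoopA2 results) (0, [])
  PySem.List.insert p.2 0 ("Removed " ++ PySem.Int.toStr p.1 ++ " results not in lineage " ++ filter ++ "\n\n")

-- ===== PORT B =====
-- loop body of B's single for-loop over results[:-1] (state: groups, current, lineage)
def pvStepB (fu : String)
    (st : List (List String × Bool) × Option (List String) × Option (List String)) (line : String) :
    List (List String × Bool) × Option (List String) × Option (List String) :=
  let groups := st.1; let current := st.2.1; let lineage := st.2.2
  let gc : List (List String × Bool) × Option (List String) :=
    if !(pvIsCont line) then
      (match current with
       | some cur => groups ++ [(cur, pvInLineage fu lineage)]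
       | none => groups,
       some [line])
    else
      match current with
      | some cur => (groups, some (cur ++ [line]))
      | none => (groups, none)
  let lineage := if PySem.Str.startswith line "Lineage: " then some (pvParseLineage line) else lineage
  (gc.1, gc.2, lineage)

def filter_summary_alt (results : List String) (filter : String) : List String :=
  let fu := PySem.Str.upper filter
  let s := (PySem.List.slice results none (some (-1))).foldl (pvStepB fu) ([], none, none)
  let groups : List (List String × Bool) :=
    match s.2.1 with
    | some cur => s.1 ++ [(cur, pvInLineage fu s.2.2)]
    | none => s.1
  let removed : Int := groups.foldl (fun (k : Int) g => if !g.2 then k + 1 else k) 0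
  groups.foldl (fun acc g => if g.2 then acc ++ g.1 else acc)
    ["Removed " ++ PySem.Int.toStr removed ++ " results not in lineage " ++ filter ++ "\n\n"]

-- ===== PRECONDITION & SPEC =====
-- Pre_ excludes exactly the inputs on which Python A raises: any empty line (IndexError at line[0]),
-- and inputs whose first entry is closed while lineage is still None (TypeError at `filter_upper in lineage`):
-- a first header line at h with h+1 < len, closing at c = min(next header index, len-1), with no
-- 'Lineage: ' line at an index < c.
def Pre_filter_summary (results : List String) (filter : String) : Prop :=
  (∀ l ∈ results, l ≠ "") ∧
  (results.findIdx (fun l => !(pvIsCont l)) + 1 < results.length →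
    ∃ j < min (results.findIdx (fun l => !(pvIsCont l)) + 1 +
               (results.drop (results.findIdx (fun l => !(pvIsCont l)) + 1)).findIdx (fun l => !(pvIsCont l)))
              (results.length - 1),
      PySem.Str.startswith (results.getD j "") "Lineage: " = true)
instance (results : List String) (filter : String) : Decidable (Pre_filter_summary results filter) := by
  unfold Pre_filter_summary; infer_instance

def pvWitness_filter_summary : List String × String :=
  (["gene1 | Homo sapiens", "Lineage: Primates; Homo", "\tseq", "gene2 | Mus musculus", "\tseq"], "primates")

def Spec_filter_summary (results : List String) (filter : String) (out : List String) : Prop := out = filter_summary_alt results filter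
instance (results : List String) (filter : String) (out : List String) : Decidable (Spec_filter_summary results filter out) := by unfold Spec_filter_summary; infer_instance

-- ===== CLAIM (what is proved, stated in full; the proofs are below) =====
def Claim_equal_filter_summary : Prop := ∀ (results : List String) (filter : String), Dom_filter_summary results filter → Pre_filter_summary results filter → Spec_filter_summary results filter (filter_summary results filter)

-- ===== LEMMAS AND PROOFS =====

-- the map from A's (i1, i2, keep) index triples to B's (lines, keep) groups
def pvGrp (results : List String) (e : Int × Int × Bool) : List String × Bool :=
  (PySem.List.slice results (some e.1) (some e.2.1), e.2.2)

-- relation between A's state after m loop steps and B's state after m body lines (m ≤ len - 1)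
def pvRel (results : List String) (m : Nat)
    (sA : List (Int × Int × Bool) × Bool × Option (List String) × Int)
    (sB : List (List String × Bool) × Option (List String) × Option (List String)) : Prop :=
  sB.2.2 = sA.2.2.1 ∧
  sB.1 = sA.1.map (pvGrp results) ∧
  ((sA.2.1 = false ∧ sB.2.1 = none) ∨
   (sA.2.1 = true ∧ ∃ j : Nat, sA.2.2.2 = (j : Int) ∧ j < m ∧
      sB.2.1 = some (PySem.List.slice results (some (j : Int)) (some (m : Int)))))

lemma pvSlice_self (results : List String) (j : Nat) :
    PySem.List.slice results (some (j : Int)) (some (j : Int)) = [] := by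
  rw [PySem.List.slice_toNat (ha := by positivity) (hb := by positivity)]
  simp

lemma pvSlice_succ (results : List String) (j m : Nat) (hj : j ≤ m) (hm : m < results.length) :
    PySem.List.slice results (some (j : Int)) (some ((m : Int) + 1)) =
      PySem.List.slice results (some (j : Int)) (some (m : Int)) ++ [results.getD m ""] := by
  rw [PySem.List.slice_toNat (ha := by positivity) (hb := by positivity),
      PySem.List.slice_toNat (ha := by positivity) (hb := by positivity)]
  have h1 : ((m : Int) + 1).toNat = m + 1 := by omega
  have h2 : ((m : Int)).toNat = m := by omega
  have h3 : ((j : Int)).toNat = j := by omega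
  rw [h1, h2, h3]
  have h4 : m + 1 - j = (m - j) + 1 := by omega
  rw [h4, List.take_add_one]
  have h5 : (results.drop j)[m - j]? = some (results.getD m "") := by
    rw [List.getElem?_drop]
    have h6 : j + (m - j) = m := by omega
    rw [h6, List.getElem?_eq_getElem hm, List.getD_eq_getElem _ _ hm]
  rw [h5]
  rfl

lemma pvStep (results : List String) (fu : String) (m : Nat) (hm : m + 1 < results.length)
    (sA : List (Int × Int × Bool) × Bool × Option (List String) × Int)
    (sB : List (List String × Bool) × Option (List String) × Option (List String))
    (h : pvRel results m sA sB) :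
    pvRel results (m + 1) (pvLoopA results (results.length : Int) fu sA (m : Int))
      (pvStepB fu sB (results.getD m "")) := by
  obtain ⟨entries, start, lineage, i1⟩ := sA
  obtain ⟨groups, current, lng⟩ := sB
  obtain ⟨hlin, hgrp, hst⟩ := h
  simp only at hlin hgrp
  have hline : PySem.List.pyGetD results ((m : Nat) : Int) "" = results.getD m "" := by
    simp [PySem.List.pyGetD_natCast]
  set line := results.getD m "" with hl
  have hbeq : (((m : Nat) : Int) == (results.length : Int) - 1) = false := by
    simp; omega
  rcases hst with ⟨hs, hcur⟩ | ⟨hs, j, hi1, hjm, hcur⟩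
  · simp only at hs hcur
    subst hs; subst hcur; subst hlin; subst hgrp
    simp only [pvLoopA, pvStepB, pvRel, hline, hbeq]
    by_cases hc : pvIsCont line = true <;>
      simp only [hc, Bool.not_true, Bool.not_false, Bool.false_and, Bool.or_false, if_true, if_false, Bool.false_eq_true]
    · exact ⟨by trivial, by trivial, Or.inl ⟨by trivial, by trivial⟩⟩
    · refine ⟨by trivial, by trivial, Or.inr ⟨by trivial, m, by trivial, by omega, ?_⟩⟩
      rw [show ((m + 1 : Nat) : Int) = (m : Int) + 1 from by push_cast; ring,
          pvSlice_succ results m m le_rfl (by omega), pvSlice_self]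
      rfl
  · simp only at hs hi1 hcur
    subst hs; subst hcur; subst hlin; subst hgrp; subst hi1
    simp only [pvLoopA, pvStepB, pvRel, hline, hbeq, Bool.true_and, Bool.or_false]
    by_cases hc : pvIsCont line = true <;>
      simp only [hc, Bool.not_true, Bool.not_false, if_true, if_false, Bool.false_eq_true]
    · -- continuation line: B appends to the open group
      refine ⟨by trivial, by trivial, Or.inr ⟨by trivial, j, by trivial, by omega, ?_⟩⟩
      rw [show ((m + 1 : Nat) : Int) = (m : Int) + 1 from by push_cast; ring,
          pvSlice_succ results j m (by omega) (by omega)]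
    · -- header line: both close the open entry and open a new one
      refine ⟨by trivial, by simp [pvGrp], Or.inr ⟨by trivial, m, by trivial, by omega, ?_⟩⟩
      rw [show ((m + 1 : Nat) : Int) = (m : Int) + 1 from by push_cast; ring,
          pvSlice_succ results m m le_rfl (by omega), pvSlice_self]
      rfl

lemma pvFoldRel (results : List String) (fu : String) :
    ∀ m : Nat, m + 1 ≤ results.length →
      pvRel results m
        ((PySem.List.pyRange 0 (m : Int) 1).foldl (pvLoopA results (results.length : Int) fu) ([], false, none, -1))
        ((results.take m).foldl (pvStepB fu) ([], none, none)) := by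
  intro m
  induction m with
  | zero =>
    intro _
    rw [PySem.List.pyRange_one_eq_nil (by omega)]
    exact ⟨rfl, rfl, Or.inl ⟨rfl, rfl⟩⟩
  | succ m ih =>
    intro hle
    have hm : m + 1 < results.length := by omega
    have hcast : ((m + 1 : Nat) : Int) = (m : Int) + 1 := by push_cast; ring
    rw [hcast, PySem.List.pyRange_one_succ_right (by omega), List.foldl_append]
    rw [List.take_add_one, List.getElem?_eq_getElem (by omega : m < results.length), List.foldl_append]
    simp only [List.foldl_cons, List.foldl_nil, Option.toList_some]
    have hgd : results[m] = results.getD m "" := (List.getD_eq_getElem _ _ (by omega)).symm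
    rw [hgd]
    exact pvStep results fu m hm _ _ (ih (by omega))

lemma pvPhase2 (results : List String) :
    ∀ (es : List (Int × Int × Bool)) (r : Int) (acc : List String),
      es.foldl (pvLoopA2 results) (r, acc) =
        ((es.map (pvGrp results)).foldl (fun (k : Int) g => if !g.2 then k + 1 else k) r,
         (es.map (pvGrp results)).foldl (fun a g => if g.2 then a ++ g.1 else a) acc) := by
  intro es
  induction es with
  | nil => intro r acc; rfl
  | cons e es ih =>
    intro r acc
    obtain ⟨a, b, k⟩ := e
    cases k <;> simp [pvLoopA2, pvGrp, ih]

lemma pvAppAcc : ∀ (gs : List (List String × Bool)) (x : List String) (acc : List String),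
    gs.foldl (fun a g => if g.2 then a ++ g.1 else a) (x ++ acc) =
      x ++ gs.foldl (fun a g => if g.2 then a ++ g.1 else a) acc := by
  intro gs
  induction gs with
  | nil => intro x acc; rfl
  | cons g gs ih =>
    intro x acc
    simp only [List.foldl_cons]
    by_cases hg : g.2 = true <;> simp only [hg, if_true, List.append_assoc] <;>
      first | exact ih x (acc ++ g.1) | exact ih x acc

lemma pvAppSingle (gs : List (List String × Bool)) (x : String) :
    gs.foldl (fun a g => if g.2 then a ++ g.1 else a) [x] =
      x :: gs.foldl (fun a g => if g.2 then a ++ g.1 else a) [] := by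
  simpa using pvAppAcc gs [x] []

-- final step: A's last iteration (i = len-1) closes the open entry exactly as B's post-loop close does
lemma pvFinal (results : List String) (fu : String) (k : Nat) (hk : k + 1 = results.length)
    (sA : List (Int × Int × Bool) × Bool × Option (List String) × Int)
    (sB : List (List String × Bool) × Option (List String) × Option (List String))
    (h : pvRel results k sA sB) :
    (match sB.2.1 with
     | some cur => sB.1 ++ [(cur, pvInLineage fu sB.2.2)]
     | none => sB.1)
    = ((pvLoopA results (results.length : Int) fu sA (k : Int)).1).map (pvGrp results) := by
  obtain ⟨entries, start, lineage, i1⟩ := sA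
  obtain ⟨groups, current, lng⟩ := sB
  obtain ⟨hlin, hgrp, hst⟩ := h
  simp only at hlin hgrp
  have hbeq : (((k : Nat) : Int) == (results.length : Int) - 1) = true := by
    simp; omega
  rcases hst with ⟨hs, hcur⟩ | ⟨hs, j, hi1, hjk, hcur⟩
  · simp only at hs hcur
    subst hs; subst hcur; subst hlin; subst hgrp
    simp [pvLoopA, hbeq]
  · simp only at hs hi1 hcur
    subst hs; subst hcur; subst hlin; subst hgrp; subst hi1
    simp [pvLoopA, hbeq, pvGrp]

-- ===== VERDICT (by name: the statement is the Claim_ definition above) =====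
theorem filter_summary_spec : Claim_equal_filter_summary := by
  intro results filter _ _
  unfold Spec_filter_summary filter_summary filter_summary_alt
  rw [PySem.List.slice_to_neg_one, List.dropLast_eq_take]
  cases hn : results.length with
  | zero =>
    have h0 : results = [] := List.length_eq_zero_iff.mp hn
    subst h0
    simp [PySem.List.pyRange_one_eq_nil, PySem.List.insert_zero]
  | succ k =>
    have hrel := pvFoldRel results (PySem.Str.upper filter) k (by omega)
    have hfin := pvFinal results (PySem.Str.upper filter) k (by omega) _ _ hrel
    rw [hn] at hfin
    have e1 : PySem.List.pyRange 0 ((k + 1 : Nat) : Int) 1 =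
        PySem.List.pyRange 0 (k : Int) 1 ++ [(k : Int)] := by
      rw [show ((k + 1 : Nat) : Int) = (k : Int) + 1 from by push_cast; ring]
      exact PySem.List.pyRange_one_succ_right (by omega)
    dsimp only
    rw [e1, List.foldl_append]
    simp only [List.foldl_cons, List.foldl_nil, Nat.add_sub_cancel]
    rw [pvPhase2, ← hfin]
    rw [PySem.List.insert_zero, pvAppSingle]
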